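-- pv_equiv track=rewrite | github.com/hardenyu21/SCG | hybrid/results/vanilla/668_CodeWithTest.py | task_func
-- ===== SOURCE A (Python) =====
-- import itertools
-- import math
--
-- def task_func(x):
--     # Extract the keys and their corresponding lengths
--     keys = list(x.keys())
--     lengths = list(x.values())
--
--     # Initialize variables to track the minimum length and the corresponding subsequence
--     min_length = math.inf
--     min_subsequence = []
--
--     # Iterate over all possible subsequences of the keys
--     for r in range(1, len(keys) + 1):
--         for subseq in itertools.combinations(keys, r):
--             # Calculate the total length of the current subsequence
--             total_length = sum(x[key] for key in subseq)
--
--             # Update the minimum length and subsequence if a shorter one is found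
--             if total_length < min_length:
--                 min_length = total_length
--                 min_subsequence = list(subseq)
--
--     return min_subsequence
-- ===== SOURCE B (Python) =====
-- def task_func(x):
--     # Single pass: the minimum-sum nonempty subset is all negative-value keys;
--     # if there are none, the single key with the smallest value (first occurrence).
--     negs = [k for k, v in x.items() if v < 0]
--     if negs:
--         return negs
--     if not x:
--         return []
--     best_k = None
--     best_v = None
--     for k, v in x.items():
--         if best_v is None or v < best_v:
--             best_k, best_v = k, v
--     return [best_k]
-- ===== Notes on version B (the rewrite author's own statement) =====
-- stated objective: faster
-- what changed: Replaced the exhaustive enumeration of all 2^n-1 nonempty key subsets with a single pass: the minimum-sum subset is exactly the negative-value keys in order, or the first minimum-value key when no value is negative. (Pre_ only rules out duplicate-key association lists, which do not represent a Python dict input at all).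
import Mathlib
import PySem

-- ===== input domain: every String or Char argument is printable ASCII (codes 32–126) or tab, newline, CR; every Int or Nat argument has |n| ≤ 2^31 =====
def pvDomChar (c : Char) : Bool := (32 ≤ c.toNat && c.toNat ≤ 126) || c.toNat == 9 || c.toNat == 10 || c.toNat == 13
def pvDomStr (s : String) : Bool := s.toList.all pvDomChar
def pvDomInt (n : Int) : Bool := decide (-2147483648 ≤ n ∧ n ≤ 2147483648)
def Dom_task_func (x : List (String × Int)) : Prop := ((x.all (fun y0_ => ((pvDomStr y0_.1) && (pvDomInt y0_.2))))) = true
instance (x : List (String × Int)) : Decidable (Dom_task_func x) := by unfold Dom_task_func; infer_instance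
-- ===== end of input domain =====

-- B replaces A's enumeration of all 2^n-1 nonempty key subsets by one pass over the
-- dict (all negative-value keys, else the first minimum-value key): asymptotically faster.

-- ===== PORT A =====
-- the inner 'if total_length < min_length' step; min_length = math.inf is the 'none' state
def pvStepA (d : PySem.Dict String Int) (st : Option Int × List String) (subseq : List String) :
    Option Int × List String :=
  let total := (subseq.map (fun k => (PySem.Dict.get? d k).getD 0)).sum  -- x[key]; key ∈ keys so get? is some
  match st.1 with
  | none => (some total, subseq)
  | some m => if total < m then (some total, subseq) else st

def task_func (x : List (String × Int)) : List String :=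
  let d := PySem.Dict.mk x
  let keys := PySem.Dict.keys d
  let st :=
    (PySem.List.pyRange 1 ((keys.length : Int) + 1) 1).foldl
      (fun st r => (PySem.List.combinations keys r.toNat).foldl (pvStepA d) st)
      ((none : Option Int), ([] : List String))
  st.2

-- ===== PORT B =====
def task_func_alt (x : List (String × Int)) : List String :=
  let negs := (x.filter (fun p => p.2 < 0)).map Prod.fst
  if negs.isEmpty then
    match x with
    | [] => []
    | p :: ps => [(ps.foldl (fun best q => if q.2 < best.2 then q else best) p).1]
  else negs

-- ===== PRECONDITION & SPEC =====
-- Pre_ excludes association lists with duplicate keys: they represent a Python dict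
-- ambiguously (dict construction keeps the last value, first-match lookup the first),
-- so no behaviour on them is the dict function's.
def Pre_task_func (x : List (String × Int)) : Prop := (x.map Prod.fst).Nodup
instance (x : List (String × Int)) : Decidable (Pre_task_func x) := by unfold Pre_task_func; infer_instance
def pvWitness_task_func : (List (String × Int)) := [("a", 2), ("b", -1), ("c", 0)]

def Spec_task_func (x : List (String × Int)) (out : List String) : Prop := out = task_func_alt x
instance (x : List (String × Int)) (out : List String) : Decidable (Spec_task_func x out) := by unfold Spec_task_func; infer_instance

-- ===== CLAIM (what is proved, stated in full; the proofs are below) =====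
def Claim_equal_task_func : Prop := ∀ (x : List (String × Int)), Dom_task_func x → Pre_task_func x → Spec_task_func x (task_func x)

-- ===== LEMMAS AND PROOFS =====

-- the value A computes for a subsequence of keys (the 'total_length' of pvStepA)
def pvVal (d : PySem.Dict String Int) (s : List String) : Int :=
  (s.map (fun k => (PySem.Dict.get? d k).getD 0)).sum

theorem pvStepA_val (d : PySem.Dict String Int) (st : Option Int × List String)
    (s : List String) :
    pvStepA d st s =
      match st.1 with
      | none => (some (pvVal d s), s)
      | some m => if pvVal d s < m then (some (pvVal d s), s) else st := rfl

-- ---- the fold keeps the first subsequence attaining the minimum value ----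
theorem pvFold_gt (d : PySem.Dict String Int) (v : Int) (L : List (List String))
    (st : Option Int × List String)
    (hst : st.1 = none ∨ ∃ m, st.1 = some m ∧ v < m)
    (hL : ∀ t ∈ L, v < pvVal d t) :
    (L.foldl (pvStepA d) st).1 = none ∨ ∃ m, (L.foldl (pvStepA d) st).1 = some m ∧ v < m := by
  induction L generalizing st with
  | nil => exact hst
  | cons t L ih =>
    refine ih _ ?_ (fun u hu => hL u (by simp [hu]))
    have hvt : v < pvVal d t := hL t (by simp)
    rcases hst with h | ⟨m, hm, hvm⟩
    · right; exact ⟨pvVal d t, by simp [pvStepA_val, h], hvt⟩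
    · by_cases hlt : pvVal d t < m
      · right; exact ⟨pvVal d t, by simp [pvStepA_val, hm, hlt], hvt⟩
      · right; exact ⟨m, by simp [pvStepA_val, hm, hlt], hvm⟩

theorem pvFold_keep (d : PySem.Dict String Int) (s : List String) (L : List (List String))
    (hL : ∀ t ∈ L, pvVal d s ≤ pvVal d t) :
    L.foldl (pvStepA d) (some (pvVal d s), s) = (some (pvVal d s), s) := by
  induction L with
  | nil => rfl
  | cons t L ih =>
    have h1 : ¬ pvVal d t < pvVal d s := not_lt.mpr (hL t (by simp))
    have : pvStepA d (some (pvVal d s), s) t = (some (pvVal d s), s) := by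
      simp [pvStepA_val, h1]
    rw [List.foldl_cons, this]
    exact ih (fun u hu => hL u (by simp [hu]))

theorem pvFold_first_argmin (d : PySem.Dict String Int) (s : List String)
    (L1 L2 : List (List String))
    (h1 : ∀ t ∈ L1, pvVal d s < pvVal d t)
    (h2 : ∀ t ∈ L2, pvVal d s ≤ pvVal d t) :
    ((L1 ++ s :: L2).foldl (pvStepA d) ((none : Option Int), ([] : List String))).2 = s := by
  rw [List.foldl_append, List.foldl_cons]
  have hmid := pvFold_gt d (pvVal d s) L1 (none, []) (Or.inl rfl) h1
  have hstep : pvStepA d (L1.foldl (pvStepA d) (none, [])) s = (some (pvVal d s), s) := by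
    rcases hmid with h | ⟨m, hm, hvm⟩
    · simp [pvStepA_val, h]
    · simp [pvStepA_val, hm, hvm]
  rw [hstep, pvFold_keep d s L2 h2]

-- ---- sums over sublists ----
theorem pvSum_sublist_le {α : Type} (g : α → Int) {v w : List α} (h : v.Sublist w)
    (hw : ∀ a ∈ w, g a ≤ 0) : (w.map g).sum ≤ (v.map g).sum := by
  induction h with
  | slnil => simp
  | cons a h ih =>
    simp only [List.map_cons, List.sum_cons]
    have := hw a (by simp)
    have := ih (fun b hb => hw b (by simp [hb]))
    omega
  | cons₂ a h ih =>
    simp only [List.map_cons, List.sum_cons]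
    have := ih (fun b hb => hw b (by simp [hb]))
    omega

theorem pvSum_sublist_eq {α : Type} (g : α → Int) {v w : List α} (h : v.Sublist w)
    (hw : ∀ a ∈ w, g a < 0) (hs : (v.map g).sum ≤ (w.map g).sum) : v = w := by
  induction h with
  | slnil => rfl
  | cons a h ih =>
    exfalso
    have hga := hw a (by simp)
    have hle := pvSum_sublist_le g h (fun b hb => le_of_lt (hw b (by simp [hb])))
    simp only [List.map_cons, List.sum_cons] at hs
    omega
  | cons₂ a h ih =>
    simp only [List.map_cons, List.sum_cons] at hs
    rw [ih (fun b hb => hw b (by simp [hb])) (by omega)]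

theorem pvSum_map_filter_split {α : Type} (g : α → Int) (q : α → Bool) (u : List α) :
    (u.map g).sum = ((u.filter q).map g).sum + ((u.filter (fun a => !q a)).map g).sum := by
  induction u with
  | nil => simp
  | cons a u ih => by_cases h : q a <;> simp [h, ih] <;> ring

theorem pvSum_nonneg {α : Type} (g : α → Int) (u : List α) (h : ∀ a ∈ u, 0 ≤ g a) :
    0 ≤ (u.map g).sum := by
  apply List.sum_nonneg
  intro b hb
  obtain ⟨a, ha, rfl⟩ := List.mem_map.mp hb
  exact h a ha

-- ---- values of subsequences of the dict's keys ----
theorem pvVal_pairs (x : List (String × Int)) (hnd : (x.map Prod.fst).Nodup)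
    (u : List (String × Int)) (hu : u.Sublist x) :
    pvVal (PySem.Dict.mk x) (u.map Prod.fst) = (u.map Prod.snd).sum := by
  unfold pvVal
  rw [List.map_map]
  congr 1
  apply List.map_congr_left
  intro p hp
  have hget : (PySem.Dict.mk x).get? p.1 = some p.2 :=
    PySem.Dict.get?_of_mem_items (PySem.Dict.mk x) (by simpa using hu.subset hp) hnd
  simp [hget]

theorem pvSum_ge_neg (x : List (String × Int)) (u : List (String × Int)) (hu : u.Sublist x) :
    ((x.filter (fun p => p.2 < 0)).map Prod.snd).sum ≤ (u.map Prod.snd).sum := by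
  rw [pvSum_map_filter_split Prod.snd (fun p => decide (p.2 < 0)) u]
  have h1 : ((x.filter (fun p => p.2 < 0)).map Prod.snd).sum
      ≤ ((u.filter (fun p => decide (p.2 < 0))).map Prod.snd).sum := by
    apply pvSum_sublist_le Prod.snd (hu.filter _)
    intro a ha
    have := (List.mem_filter.mp ha).2
    simp at this
    omega
  have h2 : 0 ≤ ((u.filter (fun a => !decide (a.2 < 0))).map Prod.snd).sum := by
    apply pvSum_nonneg
    intro a ha
    have := (List.mem_filter.mp ha).2
    simp at this
    omega
  omega

theorem pvEq_of_min (x : List (String × Int)) (u : List (String × Int)) (hu : u.Sublist x)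
    (hlen : u.length ≤ (x.filter (fun p => p.2 < 0)).length)
    (hsum : (u.map Prod.snd).sum ≤ ((x.filter (fun p => p.2 < 0)).map Prod.snd).sum) :
    u = x.filter (fun p => p.2 < 0) := by
  have hsplit := pvSum_map_filter_split Prod.snd (fun p => decide (p.2 < 0)) u
  have hgeA : ((x.filter (fun p => p.2 < 0)).map Prod.snd).sum
      ≤ ((u.filter (fun p => decide (p.2 < 0))).map Prod.snd).sum := by
    apply pvSum_sublist_le Prod.snd (hu.filter _)
    intro a ha
    have := (List.mem_filter.mp ha).2
    simp at this; omega
  have hB : 0 ≤ ((u.filter (fun a => !decide (a.2 < 0))).map Prod.snd).sum := by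
    apply pvSum_nonneg
    intro a ha
    have := (List.mem_filter.mp ha).2
    simp at this; omega
  have hAle : ((u.filter (fun p => decide (p.2 < 0))).map Prod.snd).sum
      ≤ ((x.filter (fun p => p.2 < 0)).map Prod.snd).sum := by omega
  have hfe : u.filter (fun p => decide (p.2 < 0)) = x.filter (fun p => p.2 < 0) := by
    apply pvSum_sublist_eq Prod.snd (hu.filter _) ?_ hAle
    intro a ha
    have := (List.mem_filter.mp ha).2
    simp at this; omega
  have hflen : (u.filter (fun p => decide (p.2 < 0))).length = u.length := by
    have h1 : (u.filter (fun p => decide (p.2 < 0))).length ≤ u.length :=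
      (List.filter_sublist (l := u)).length_le
    rw [hfe] at *
    omega
  have : u.filter (fun p => decide (p.2 < 0)) = u :=
    (List.filter_sublist (l := u)).eq_of_length hflen
  rw [← hfe, this]

-- ---- A's nested loop is a fold over the flat list of all nonempty subsequences ----
theorem pvTaskA_eq (x : List (String × Int)) :
    task_func x =
      (((List.range x.length).flatMap
          (fun j => PySem.List.combinations (x.map Prod.fst) (j + 1))).foldl
        (pvStepA (PySem.Dict.mk x)) ((none : Option Int), ([] : List String))).2 := by
  simp only [task_func]
  have hkeys : PySem.Dict.keys (PySem.Dict.mk x) = x.map Prod.fst := rfl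
  rw [List.foldl_flatMap, hkeys, PySem.List.pyRange_one, List.foldl_map]
  have hn : (((x.map Prod.fst).length : Int) + 1 - 1).toNat = x.length := by simp
  rw [hn]
  congr 2
  funext st j
  have h1 : ((1 : Int) + (j : Int)).toNat = j + 1 := by omega
  rw [h1]

-- ---- B's fold keeps the first pair of minimum value ----
theorem pvFoldMin_le (ps : List (String × Int)) (p0 : String × Int) :
    (ps.foldl (fun best q => if q.2 < best.2 then q else best) p0).2 ≤ p0.2 := by
  induction ps generalizing p0 with
  | nil => exact le_refl _
  | cons q ps ih =>
    rw [List.foldl_cons]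
    by_cases h : q.2 < p0.2
    · rw [if_pos h]; exact le_trans (ih q) (le_of_lt h)
    · rw [if_neg h]; exact ih p0

theorem pvFoldMin_spec (ps : List (String × Int)) (p0 : String × Int) :
    ∃ x1 x2, p0 :: ps = x1 ++ (ps.foldl (fun best q => if q.2 < best.2 then q else best) p0) :: x2 ∧
      (∀ q ∈ x1, (ps.foldl (fun best q => if q.2 < best.2 then q else best) p0).2 < q.2) ∧
      (∀ q ∈ x2, (ps.foldl (fun best q => if q.2 < best.2 then q else best) p0).2 ≤ q.2) := by
  induction ps generalizing p0 with
  | nil => exact ⟨[], [], rfl, by simp, by simp⟩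
  | cons q ps ih =>
    rw [List.foldl_cons]
    by_cases h : q.2 < p0.2
    · rw [if_pos h]
      obtain ⟨y1, y2, heq, h1, h2⟩ := ih q
      refine ⟨p0 :: y1, y2, by rw [List.cons_append, ← heq], ?_, h2⟩
      intro q' hq'
      rcases List.mem_cons.mp hq' with rfl | hq'
      · exact lt_of_le_of_lt (pvFoldMin_le ps q) h
      · exact h1 q' hq'
    · rw [if_neg h]
      obtain ⟨y1, y2, heq, h1, h2⟩ := ih p0
      cases y1 with
      | nil =>
        simp only [List.nil_append] at heq
        have hm : List.foldl (fun best q => if q.2 < best.2 then q else best) p0 ps = p0 :=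
          (List.cons.inj heq).1.symm
        have hy2 : ps = y2 := (List.cons.inj heq).2
        refine ⟨[], q :: ps, by rw [List.nil_append, hm], by simp, ?_⟩
        intro q' hq'
        rcases List.mem_cons.mp hq' with rfl | hq'
        · rw [hm]; omega
        · rw [hy2] at hq'; exact h2 q' hq'
      | cons a y1' =>
        rw [List.cons_append] at heq
        have ha : a = p0 := ((List.cons.inj heq).1).symm
        have hps : ps = y1' ++ List.foldl (fun best q => if q.2 < best.2 then q else best) p0 ps :: y2 :=
          (List.cons.inj heq).2
        have hstrict_p0 : (List.foldl (fun best q => if q.2 < best.2 then q else best) p0 ps).2 < p0.2 :=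
          ha ▸ h1 a (by simp)
        refine ⟨p0 :: q :: y1', y2, by rw [List.cons_append, List.cons_append, ← hps], ?_, h2⟩
        intro q' hq'
        rcases List.mem_cons.mp hq' with rfl | hq'
        · exact hstrict_p0
        rcases List.mem_cons.mp hq' with rfl | hq'
        · omega
        · exact h1 q' (by simp [hq'])


theorem pv_assoc {α : Type} (P C1 C2 R : List α) (s : α) :
    (P ++ (C1 ++ s :: C2)) ++ R = (P ++ C1) ++ s :: (C2 ++ R) := by
  simp [List.append_assoc]

-- ---- main equivalence ----
theorem pv_main (x : List (String × Int)) (hnd : (x.map Prod.fst).Nodup) :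
    task_func x = task_func_alt x := by
  rw [pvTaskA_eq]
  by_cases hneg : x.filter (fun p => p.2 < 0) = []
  · -- no negative values: the answer is the first minimum-value key (or [] for empty x)
    have hval0 : ∀ p ∈ x, 0 ≤ p.2 := by
      intro p hp
      have := List.filter_eq_nil_iff.mp hneg p hp
      simp at this; omega
    cases x with
    | nil => rfl
    | cons p0 ps =>
      set m := ps.foldl (fun best q => if q.2 < best.2 then q else best) p0 with hm
      have halt : task_func_alt (p0 :: ps) = [m.1] := by
        simp only [task_func_alt, hneg]
        rfl
      rw [halt]
      obtain ⟨x1, x2, hsplit, hs1, hs2⟩ := pvFoldMin_spec ps p0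
      rw [← hm] at hsplit hs1 hs2
      have hm_mem : m ∈ p0 :: ps := by rw [hsplit]; simp
      have hm_le : ∀ q ∈ p0 :: ps, m.2 ≤ q.2 := by
        intro q hq
        rw [hsplit] at hq
        rcases List.mem_append.mp hq with hq | hq
        · exact le_of_lt (hs1 q hq)
        · rcases List.mem_cons.mp hq with rfl | hq
          · exact le_refl _
          · exact hs2 q hq
      have hvalm : pvVal (PySem.Dict.mk (p0 :: ps)) [m.1] = m.2 := by
        have := pvVal_pairs (p0 :: ps) hnd [m] (List.singleton_sublist.mpr hm_mem)
        simpa using this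
      have hge : ∀ t, t.Sublist ((p0 :: ps).map Prod.fst) → t ≠ [] →
          pvVal (PySem.Dict.mk (p0 :: ps)) [m.1] ≤ pvVal (PySem.Dict.mk (p0 :: ps)) t := by
        intro t hts htne
        obtain ⟨u, hu, rfl⟩ := List.sublist_map_iff.mp hts
        rw [pvVal_pairs (p0 :: ps) hnd u hu, hvalm]
        cases u with
        | nil => simp at htne
        | cons a u' =>
          have ha : m.2 ≤ a.2 := hm_le a (hu.subset (by simp))
          have h0 : 0 ≤ (u'.map Prod.snd).sum := by
            apply pvSum_nonneg
            intro b hb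
            exact hval0 b ((List.sublist_cons_self a u').trans hu |>.subset hb)
          simp only [List.map_cons, List.sum_cons]
          omega
      -- decompose the list of all subsequences around the singleton [m.1]
      have hrange : List.range (p0 :: ps).length = 0 :: (List.range ps.length).map Nat.succ := by
        simpa using List.range_succ_eq_map
      rw [hrange, List.flatMap_cons]
      rw [PySem.List.combinations_one]
      have hkeys : (p0 :: ps).map Prod.fst = x1.map Prod.fst ++ m.1 :: x2.map Prod.fst := by
        rw [hsplit]; simp
      conv_lhs => rw [hkeys]
      rw [List.map_append, List.map_cons, List.append_assoc, List.cons_append]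
      apply pvFold_first_argmin
      · -- singletons of the keys before the first minimum: strictly larger values
        intro t ht
        obtain ⟨k1, hk1, rfl⟩ := List.mem_map.mp ht
        obtain ⟨q, hq, rfl⟩ := List.mem_map.mp hk1
        have hqx : q ∈ p0 :: ps := by rw [hsplit]; simp [hq]
        have : pvVal (PySem.Dict.mk (p0 :: ps)) [q.1] = q.2 := by
          have := pvVal_pairs (p0 :: ps) hnd [q] (List.singleton_sublist.mpr hqx)
          simpa using this
        rw [hvalm, this]
        exact hs1 q hq
      · -- everything after it: value at least m.2
        intro t ht
        rcases List.mem_append.mp ht with ht | ht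
        · obtain ⟨k1, hk1, rfl⟩ := List.mem_map.mp ht
          obtain ⟨q, hq, rfl⟩ := List.mem_map.mp hk1
          have hqx : q ∈ p0 :: ps := by rw [hsplit]; simp [hq]
          exact hge [q.1] ((List.singleton_sublist.mpr hqx).map Prod.fst) (by simp)
        · obtain ⟨j, _, htj⟩ := List.mem_flatMap.mp ht
          obtain ⟨hts, htl⟩ := (PySem.List.mem_combinations_iff _ _ _).mp htj
          rw [← hkeys] at hts
          refine hge t hts ?_
          intro hnil
          rw [hnil] at htl
          simp at htl
  · -- some negative values: the answer is the list of all negative-value keys in order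
    have halt : task_func_alt x = (x.filter (fun p => p.2 < 0)).map Prod.fst := by
      have h1 : ((x.filter (fun p => p.2 < 0)).map Prod.fst).isEmpty = false := by
        simp [hneg]
      simp [task_func_alt, h1]
    rw [halt]
    have hk1 : 1 ≤ (x.filter (fun p => p.2 < 0)).length :=
      List.length_pos_iff.mpr hneg
    have hkn : (x.filter (fun p => p.2 < 0)).length ≤ x.length :=
      (List.filter_sublist (l := x)).length_le
    have hsubneg : ((x.filter (fun p => p.2 < 0)).map Prod.fst).Sublist (x.map Prod.fst) :=
      (List.filter_sublist (l := x)).map Prod.fst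
    have hmem : (x.filter (fun p => p.2 < 0)).map Prod.fst ∈
        PySem.List.combinations (x.map Prod.fst) ((x.filter (fun p => p.2 < 0)).length) :=
      (PySem.List.mem_combinations_iff _ _ _).mpr ⟨hsubneg, by simp⟩
    obtain ⟨C1, C2, hC, hnotin⟩ := List.eq_append_cons_of_mem hmem
    have hvalnegs : pvVal (PySem.Dict.mk x) ((x.filter (fun p => p.2 < 0)).map Prod.fst)
        = ((x.filter (fun p => p.2 < 0)).map Prod.snd).sum :=
      pvVal_pairs x hnd _ (List.filter_sublist (l := x))
    have hge : ∀ t, t.Sublist (x.map Prod.fst) →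
        pvVal (PySem.Dict.mk x) ((x.filter (fun p => p.2 < 0)).map Prod.fst)
          ≤ pvVal (PySem.Dict.mk x) t := by
      intro t hts
      obtain ⟨u, hu, rfl⟩ := List.sublist_map_iff.mp hts
      rw [pvVal_pairs x hnd u hu, hvalnegs]
      exact pvSum_ge_neg x u hu
    have hgt : ∀ t, t.Sublist (x.map Prod.fst) →
        t.length ≤ (x.filter (fun p => p.2 < 0)).length →
        t ≠ (x.filter (fun p => p.2 < 0)).map Prod.fst →
        pvVal (PySem.Dict.mk x) ((x.filter (fun p => p.2 < 0)).map Prod.fst)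
          < pvVal (PySem.Dict.mk x) t := by
      intro t hts htl htne
      obtain ⟨u, hu, rfl⟩ := List.sublist_map_iff.mp hts
      rw [pvVal_pairs x hnd u hu, hvalnegs]
      by_contra hc
      push_neg at hc
      have hu_eq := pvEq_of_min x u hu (by simpa using htl) hc
      exact htne (by rw [hu_eq])
    have e1 : x.length = (((x.filter (fun p => p.2 < 0)).length - 1) + 1)
        + (x.length - (x.filter (fun p => p.2 < 0)).length) := by omega
    rw [e1, List.range_add, List.range_succ]
    have e2 : ((x.filter (fun p => p.2 < 0)).length - 1) + 1
        = (x.filter (fun p => p.2 < 0)).length := by omega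
    rw [List.flatMap_append, List.flatMap_append, List.flatMap_singleton, e2, hC, pv_assoc]
    apply pvFold_first_argmin
    · intro t ht
      rcases List.mem_append.mp ht with ht | ht
      · obtain ⟨j, hj, htj⟩ := List.mem_flatMap.mp ht
        have hj' : j < (x.filter (fun p => p.2 < 0)).length - 1 := List.mem_range.mp hj
        obtain ⟨hts, htl⟩ := (PySem.List.mem_combinations_iff _ _ _).mp htj
        refine hgt t hts (by omega) ?_
        intro he
        rw [he] at htl
        simp at htl
        omega
      · have htC : t ∈ PySem.List.combinations (x.map Prod.fst)
            ((x.filter (fun p => p.2 < 0)).length) := by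
          rw [hC]; exact List.mem_append.mpr (Or.inl ht)
        obtain ⟨hts, htl⟩ := (PySem.List.mem_combinations_iff _ _ _).mp htC
        exact hgt t hts (by omega) (fun he => hnotin (he ▸ ht))
    · intro t ht
      rcases List.mem_append.mp ht with ht | ht
      · have htC : t ∈ PySem.List.combinations (x.map Prod.fst)
            ((x.filter (fun p => p.2 < 0)).length) := by
          rw [hC]; exact List.mem_append.mpr (Or.inr (List.mem_cons.mpr (Or.inr ht)))
        exact hge t ((PySem.List.mem_combinations_iff _ _ _).mp htC).1
      · obtain ⟨j, _, htj⟩ := List.mem_flatMap.mp ht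
        exact hge t ((PySem.List.mem_combinations_iff _ _ _).mp htj).1

-- ===== VERDICT (by name: the statement is the Claim_ definition above) =====
theorem task_func_spec : Claim_equal_task_func := by
  intro x _ hpre
  exact pv_main x hpre
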